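-- pv_equiv track=rewrite | github.com/ClearAnatomics/ClearMap | ClearMap/Utils/TagExpression.py | escape_glob
-- ===== SOURCE A (Python) =====
-- def escape_glob(string):
--   e = '';
--   for c in string:
--     if c in '?[]':
--       e += '[' + c + ']';
--     else:
--       e += c;
--   return e;
-- ===== SOURCE B (Python) =====
-- def escape_glob(string):
--   # Divide and conquer: escaping distributes over concatenation, so split the
--   # string in half, escape each half independently, and concatenate the results.
--   n = len(string)
--   if n == 0:
--     return string
--   if n == 1:
--     return '[' + string + ']' if string in '?[]' else string
--   m = n // 2
--   return escape_glob(string[:m]) + escape_glob(string[m:])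
-- ===== Notes on version B (the rewrite author's own statement) =====
-- stated objective: alternative
-- what changed: Replaces the sequential accumulating scan with a divide-and-conquer recursion: split the string in half, escape each half, concatenate (correct because escaping distributes over concatenation).
import Mathlib
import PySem

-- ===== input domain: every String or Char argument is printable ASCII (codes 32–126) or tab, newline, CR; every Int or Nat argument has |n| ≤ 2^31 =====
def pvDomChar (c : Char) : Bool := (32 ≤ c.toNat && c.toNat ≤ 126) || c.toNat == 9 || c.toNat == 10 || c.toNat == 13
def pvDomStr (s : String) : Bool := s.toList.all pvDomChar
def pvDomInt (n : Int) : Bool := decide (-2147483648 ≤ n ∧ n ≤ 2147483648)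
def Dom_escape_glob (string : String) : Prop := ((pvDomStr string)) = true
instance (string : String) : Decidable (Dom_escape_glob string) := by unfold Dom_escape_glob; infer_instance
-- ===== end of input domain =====

-- B replaces A's sequential accumulating scan with a divide-and-conquer recursion
-- (split in half, escape the halves, concatenate); alternative structure, no speed claim.


-- ===== PORT A =====
-- A: accumulate e over the chars; append '[c]' if c in '?[]', else c.
def escape_glob (string : String) : String :=
  string.toList.foldl
    (fun e c =>
      if c ∈ "?[]".toList then e ++ "[" ++ String.ofList [c] ++ "]"
      else e ++ String.ofList [c]) ""

-- ===== PORT B =====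
-- B on code points (string[:m] / string[m:] are take/drop of the char list,
-- = PySem.List.slice with bounds 0..m / m..; 'string in "?[]"' on a 1-char string
-- is membership of that char).
def escGo (l : List Char) : List Char :=
  if _h0 : l.length = 0 then l
  else if _h1 : l.length = 1 then
    match l with
    | c :: _ => if c ∈ "?[]".toList then '[' :: c :: ']' :: [] else [c]
    | [] => []
  else
    escGo (l.take (l.length / 2)) ++ escGo (l.drop (l.length / 2))
termination_by l.length
decreasing_by
  · simp; omega
  · simp; omega

def escape_glob_alt (string : String) : String :=
  String.ofList (escGo string.toList)

-- ===== PRECONDITION & SPEC =====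
def Spec_escape_glob (string : String) (out : String) : Prop := out = escape_glob_alt string
instance (string : String) (out : String) : Decidable (Spec_escape_glob string out) := by unfold Spec_escape_glob; infer_instance

-- ===== CLAIM (what is proved, stated in full; the proofs are below) =====
def Claim_equal_escape_glob : Prop := ∀ (string : String), Dom_escape_glob string → Spec_escape_glob string (escape_glob string)

-- ===== LEMMAS AND PROOFS =====
-- the per-character escape, and its list extension
def pvPiece (c : Char) : List Char := if c ∈ "?[]".toList then ['[', c, ']'] else [c]

theorem escGo_eq_flatMap (l : List Char) : escGo l = l.flatMap pvPiece := by
  induction hn : l.length using Nat.strong_induction_on generalizing l with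
  | _ n ih =>
    subst hn
    rw [escGo]
    by_cases h0 : l.length = 0
    · simp [List.length_eq_zero_iff.mp h0]
    by_cases h1 : l.length = 1
    · obtain ⟨c, rfl⟩ := List.length_eq_one_iff.mp h1
      simp [pvPiece]
    · simp only [h0, h1, dif_neg, not_false_iff]
      rw [ih (l.take (l.length / 2)).length (by simp; omega) _ rfl,
          ih (l.drop (l.length / 2)).length (by simp; omega) _ rfl,
          ← List.flatMap_append, List.take_append_drop]

theorem pvFoldA (l : List Char) (e : String) :
    l.foldl (fun e c =>
      if c ∈ "?[]".toList then e ++ "[" ++ String.ofList [c] ++ "]"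
      else e ++ String.ofList [c]) e
    = e ++ String.ofList (l.flatMap pvPiece) := by
  induction l generalizing e with
  | nil => apply String.toList_inj.mp; simp
  | cons c t ih =>
    rw [List.foldl_cons, List.flatMap_cons, ih, pvPiece]
    apply String.toList_inj.mp
    split_ifs <;> simp

-- ===== VERDICT (by name: the statement is the Claim_ definition above) =====
theorem escape_glob_spec : Claim_equal_escape_glob := by
  intro s _
  unfold Spec_escape_glob escape_glob escape_glob_alt
  rw [pvFoldA, escGo_eq_flatMap]
  apply String.toList_inj.mp
  simp
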